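-- pv_equiv track=rewrite | github.com/enerone/listing_maker | app/agents/image_search_agent.py | _categorize_images
-- ===== SOURCE A (Python) =====
-- from typing import Dict, Any, List, Optional
--
-- def _categorize_images(downloaded_images: List[Dict[str, Any]]) -> Dict[str, List[str]]:
--     """
--     Categoriza las imágenes descargadas por tipo.
--     """
--     categories = {
--         "product_shots": [],
--         "lifestyle": [],
--         "detail_shots": [],
--         "packaging": [],
--         "usage_scenarios": []
--     }
--
--     for image in downloaded_images:
--         search_term = image.get("search_term", "").lower()
--         filename = image.get("filename", "")
--
--         # Lógica simple de categorización basada en términos de búsqueda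
--         if any(word in search_term for word in ["product", "isolated", "white background"]):
--             categories["product_shots"].append(filename)
--         elif any(word in search_term for word in ["lifestyle", "home", "kitchen", "office"]):
--             categories["lifestyle"].append(filename)
--         elif any(word in search_term for word in ["detail", "close up", "macro"]):
--             categories["detail_shots"].append(filename)
--         elif any(word in search_term for word in ["package", "box", "packaging"]):
--             categories["packaging"].append(filename)
--         elif any(word in search_term for word in ["use", "using", "action", "demo"]):
--             categories["usage_scenarios"].append(filename)
--         else:
--             categories["product_shots"].append(filename)  # Default
--
--     return categories
-- ===== SOURCE B (Python) =====
-- from typing import Dict, Any, List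
--
-- CATEGORY_KEYWORDS = [
--     ("product_shots", ["product", "isolated", "white background"]),
--     ("lifestyle", ["lifestyle", "home", "kitchen", "office"]),
--     ("detail_shots", ["detail", "close up", "macro"]),
--     ("packaging", ["package", "box", "packaging"]),
--     ("usage_scenarios", ["use", "using", "action", "demo"]),
-- ]
--
--
-- def _classify(image: Dict[str, Any]) -> str:
--     term = image.get("search_term", "").lower()
--     for cat, words in CATEGORY_KEYWORDS:
--         if any(w in term for w in words):
--             return cat
--     return "product_shots"
--
--
-- def _categorize_images(downloaded_images: List[Dict[str, Any]]) -> Dict[str, List[str]]: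
--     return {
--         cat: [img.get("filename", "") for img in downloaded_images if _classify(img) == cat]
--         for cat, _ in CATEGORY_KEYWORDS
--     }
-- ===== Notes on version B (the rewrite author's own statement) =====
-- stated objective: idiomatic
-- what changed: Replaces the single-pass if/elif cascade with mutating appends by a data-driven keyword table plus a first-match classifier, building each category's list by a per-category filter comprehension instead of appending inside one loop.
import Mathlib
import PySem

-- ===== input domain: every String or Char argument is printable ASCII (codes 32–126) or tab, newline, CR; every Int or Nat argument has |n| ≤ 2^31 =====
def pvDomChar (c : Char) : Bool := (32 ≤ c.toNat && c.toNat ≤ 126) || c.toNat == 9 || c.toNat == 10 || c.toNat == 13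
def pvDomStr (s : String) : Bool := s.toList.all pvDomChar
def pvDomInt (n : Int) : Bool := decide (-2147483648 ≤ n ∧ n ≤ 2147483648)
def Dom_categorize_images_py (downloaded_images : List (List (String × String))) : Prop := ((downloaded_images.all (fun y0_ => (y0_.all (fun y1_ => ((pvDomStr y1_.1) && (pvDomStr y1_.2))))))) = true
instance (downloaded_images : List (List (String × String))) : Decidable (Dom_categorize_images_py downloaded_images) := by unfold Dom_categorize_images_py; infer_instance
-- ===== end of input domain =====

-- B replaces A's if/elif cascade with a keyword table + first-match classifier and per-category filters (idiomatic decomposition, same cost).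


-- ===== PORT A =====
def categorize_images_py (downloaded_images : List (List (String × String))) : List (String × List String) :=
  let categories : PySem.Dict String (List String) :=
    ((((PySem.Dict.empty.insert "product_shots" []).insert "lifestyle" []).insert
        "detail_shots" []).insert "packaging" []).insert "usage_scenarios" []
  let final := downloaded_images.foldl (fun categories image =>
    let search_term := PySem.Str.lower ((PySem.Dict.mk image).getD "search_term" "")
    let filename := (PySem.Dict.mk image).getD "filename" ""
    if ["product", "isolated", "white background"].any (fun word => PySem.Str.isIn word search_term) then
      categories.modify "product_shots" [] (fun l => l ++ [filename])
    else if ["lifestyle", "home", "kitchen", "office"].any (fun word => PySem.Str.isIn word search_term) then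
      categories.modify "lifestyle" [] (fun l => l ++ [filename])
    else if ["detail", "close up", "macro"].any (fun word => PySem.Str.isIn word search_term) then
      categories.modify "detail_shots" [] (fun l => l ++ [filename])
    else if ["package", "box", "packaging"].any (fun word => PySem.Str.isIn word search_term) then
      categories.modify "packaging" [] (fun l => l ++ [filename])
    else if ["use", "using", "action", "demo"].any (fun word => PySem.Str.isIn word search_term) then
      categories.modify "usage_scenarios" [] (fun l => l ++ [filename])
    else
      categories.modify "product_shots" [] (fun l => l ++ [filename])) categories
  final.items

-- ===== PORT B =====
def pvCategoryKeywords : List (String × List String) :=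
  [("product_shots", ["product", "isolated", "white background"]),
   ("lifestyle", ["lifestyle", "home", "kitchen", "office"]),
   ("detail_shots", ["detail", "close up", "macro"]),
   ("packaging", ["package", "box", "packaging"]),
   ("usage_scenarios", ["use", "using", "action", "demo"])]

-- _classify's for/return loop over the table, as structural recursion
def pvPickCat : List (String × List String) → String → String
  | [], _ => "product_shots"
  | (cat, words) :: rest, term =>
      if words.any (fun w => PySem.Str.isIn w term) then cat else pvPickCat rest term

def pvClassify (image : List (String × String)) : String :=
  pvPickCat pvCategoryKeywords (PySem.Str.lower ((PySem.Dict.mk image).getD "search_term" ""))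

def categorize_images_py_alt (downloaded_images : List (List (String × String))) : List (String × List String) :=
  pvCategoryKeywords.map (fun cw =>
    (cw.1, (downloaded_images.filter (fun img => pvClassify img == cw.1)).map
              (fun img => (PySem.Dict.mk img).getD "filename" "")))

-- ===== PRECONDITION & SPEC =====
def Spec_categorize_images_py (downloaded_images : List (List (String × String))) (out : List (String × List String)) : Prop := out = categorize_images_py_alt downloaded_images
instance (downloaded_images : List (List (String × String))) (out : List (String × List String)) : Decidable (Spec_categorize_images_py downloaded_images out) := by unfold Spec_categorize_images_py; infer_instance

-- ===== CLAIM (what is proved, stated in full; the proofs are below) =====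
def Claim_equal_categorize_images_py : Prop := ∀ (downloaded_images : List (List (String × String))), Dom_categorize_images_py downloaded_images → Spec_categorize_images_py downloaded_images (categorize_images_py downloaded_images)

-- ===== LEMMAS AND PROOFS =====

-- filtered filenames of those images classified into category c
def pvBucket (c : String) (xs : List (List (String × String))) : List String :=
  (xs.filter (fun img => pvClassify img == c)).map (fun img => (PySem.Dict.mk img).getD "filename" "")

-- A's loop body is "append the filename under the classifier's category"
lemma stepA_eq (d : PySem.Dict String (List String)) (image : List (String × String)) :
    (let search_term := PySem.Str.lower ((PySem.Dict.mk image).getD "search_term" "")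
     let filename := (PySem.Dict.mk image).getD "filename" ""
     if ["product", "isolated", "white background"].any (fun word => PySem.Str.isIn word search_term) then
       d.modify "product_shots" [] (fun l => l ++ [filename])
     else if ["lifestyle", "home", "kitchen", "office"].any (fun word => PySem.Str.isIn word search_term) then
       d.modify "lifestyle" [] (fun l => l ++ [filename])
     else if ["detail", "close up", "macro"].any (fun word => PySem.Str.isIn word search_term) then
       d.modify "detail_shots" [] (fun l => l ++ [filename])
     else if ["package", "box", "packaging"].any (fun word => PySem.Str.isIn word search_term) then
       d.modify "packaging" [] (fun l => l ++ [filename])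
     else if ["use", "using", "action", "demo"].any (fun word => PySem.Str.isIn word search_term) then
       d.modify "usage_scenarios" [] (fun l => l ++ [filename])
     else
       d.modify "product_shots" [] (fun l => l ++ [filename]))
    = d.modify (pvClassify image) [] (fun l => l ++ [(PySem.Dict.mk image).getD "filename" ""]) := by
  simp only [pvClassify, pvCategoryKeywords, pvPickCat]
  split_ifs <;> rfl

lemma pvClassify_mem (image : List (String × String)) :
    pvClassify image = "product_shots" ∨ pvClassify image = "lifestyle" ∨
    pvClassify image = "detail_shots" ∨ pvClassify image = "packaging" ∨
    pvClassify image = "usage_scenarios" := by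
  simp only [pvClassify, pvCategoryKeywords, pvPickCat]
  split_ifs <;> simp

-- loop invariant: folding the append-step over xs extends each of the five buckets
lemma foldl_modify_inv (xs : List (List (String × String))) (a b c d e : List String) :
    xs.foldl (fun dct img => dct.modify (pvClassify img) [] (fun l => l ++ [(PySem.Dict.mk img).getD "filename" ""]))
      (PySem.Dict.mk [("product_shots", a), ("lifestyle", b), ("detail_shots", c), ("packaging", d), ("usage_scenarios", e)])
    = PySem.Dict.mk [("product_shots", a ++ pvBucket "product_shots" xs),
                     ("lifestyle", b ++ pvBucket "lifestyle" xs),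
                     ("detail_shots", c ++ pvBucket "detail_shots" xs),
                     ("packaging", d ++ pvBucket "packaging" xs),
                     ("usage_scenarios", e ++ pvBucket "usage_scenarios" xs)] := by
  induction xs generalizing a b c d e with
  | nil => simp [pvBucket]
  | cons x t ih =>
    rw [List.foldl_cons]
    rcases pvClassify_mem x with h | h | h | h | h <;> simp only [h] <;>
      [rw [show (PySem.Dict.mk [("product_shots", a), ("lifestyle", b), ("detail_shots", c), ("packaging", d), ("usage_scenarios", e)]).modify "product_shots" [] (fun l => l ++ [(PySem.Dict.mk x).getD "filename" ""]) = PySem.Dict.mk [("product_shots", a ++ [(PySem.Dict.mk x).getD "filename" ""]), ("lifestyle", b), ("detail_shots", c), ("packaging", d), ("usage_scenarios", e)] from by simp [PySem.Dict.modify, PySem.Dict.insert, PySem.Dict.getD, PySem.Dict.get?, PySem.Dict.contains]];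
       rw [show (PySem.Dict.mk [("product_shots", a), ("lifestyle", b), ("detail_shots", c), ("packaging", d), ("usage_scenarios", e)]).modify "lifestyle" [] (fun l => l ++ [(PySem.Dict.mk x).getD "filename" ""]) = PySem.Dict.mk [("product_shots", a), ("lifestyle", b ++ [(PySem.Dict.mk x).getD "filename" ""]), ("detail_shots", c), ("packaging", d), ("usage_scenarios", e)] from by simp [PySem.Dict.modify, PySem.Dict.insert, PySem.Dict.getD, PySem.Dict.get?, PySem.Dict.contains]];
       rw [show (PySem.Dict.mk [("product_shots", a), ("lifestyle", b), ("detail_shots", c), ("packaging", d), ("usage_scenarios", e)]).modify "detail_shots" [] (fun l => l ++ [(PySem.Dict.mk x).getD "filename" ""]) = PySem.Dict.mk [("product_shots", a), ("lifestyle", b), ("detail_shots", c ++ [(PySem.Dict.mk x).getD "filename" ""]), ("packaging", d), ("usage_scenarios", e)] from by simp [PySem.Dict.modify, PySem.Dict.insert, PySem.Dict.getD, PySem.Dict.get?, PySem.Dict.contains]];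
       rw [show (PySem.Dict.mk [("product_shots", a), ("lifestyle", b), ("detail_shots", c), ("packaging", d), ("usage_scenarios", e)]).modify "packaging" [] (fun l => l ++ [(PySem.Dict.mk x).getD "filename" ""]) = PySem.Dict.mk [("product_shots", a), ("lifestyle", b), ("detail_shots", c), ("packaging", d ++ [(PySem.Dict.mk x).getD "filename" ""]), ("usage_scenarios", e)] from by simp [PySem.Dict.modify, PySem.Dict.insert, PySem.Dict.getD, PySem.Dict.get?, PySem.Dict.contains]];
       rw [show (PySem.Dict.mk [("product_shots", a), ("lifestyle", b), ("detail_shots", c), ("packaging", d), ("usage_scenarios", e)]).modify "usage_scenarios" [] (fun l => l ++ [(PySem.Dict.mk x).getD "filename" ""]) = PySem.Dict.mk [("product_shots", a), ("lifestyle", b), ("detail_shots", c), ("packaging", d), ("usage_scenarios", e ++ [(PySem.Dict.mk x).getD "filename" ""])] from by simp [PySem.Dict.modify, PySem.Dict.insert, PySem.Dict.getD, PySem.Dict.get?, PySem.Dict.contains]]] <;>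
      rw [ih] <;> simp [pvBucket, h]

-- ===== VERDICT (by name: the statement is the Claim_ definition above) =====
theorem categorize_images_py_spec : Claim_equal_categorize_images_py := by
  intro xs _
  show categorize_images_py xs = categorize_images_py_alt xs
  simp only [categorize_images_py]
  have h0 : ((((PySem.Dict.empty.insert "product_shots" ([] : List String)).insert "lifestyle" []).insert
      "detail_shots" []).insert "packaging" []).insert "usage_scenarios" [] =
      PySem.Dict.mk [("product_shots", []), ("lifestyle", []), ("detail_shots", []), ("packaging", []), ("usage_scenarios", [])] := by
    decide
  rw [h0]
  have hfold :
      xs.foldl (fun categories image =>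
        let search_term := PySem.Str.lower ((PySem.Dict.mk image).getD "search_term" "")
        let filename := (PySem.Dict.mk image).getD "filename" ""
        if ["product", "isolated", "white background"].any (fun word => PySem.Str.isIn word search_term) then
          categories.modify "product_shots" [] (fun l => l ++ [filename])
        else if ["lifestyle", "home", "kitchen", "office"].any (fun word => PySem.Str.isIn word search_term) then
          categories.modify "lifestyle" [] (fun l => l ++ [filename])
        else if ["detail", "close up", "macro"].any (fun word => PySem.Str.isIn word search_term) then
          categories.modify "detail_shots" [] (fun l => l ++ [filename])
        else if ["package", "box", "packaging"].any (fun word => PySem.Str.isIn word search_term) then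
          categories.modify "packaging" [] (fun l => l ++ [filename])
        else if ["use", "using", "action", "demo"].any (fun word => PySem.Str.isIn word search_term) then
          categories.modify "usage_scenarios" [] (fun l => l ++ [filename])
        else
          categories.modify "product_shots" [] (fun l => l ++ [filename]))
        (PySem.Dict.mk [("product_shots", []), ("lifestyle", []), ("detail_shots", []), ("packaging", []), ("usage_scenarios", [])])
      = xs.foldl (fun dct img => dct.modify (pvClassify img) [] (fun l => l ++ [(PySem.Dict.mk img).getD "filename" ""]))
        (PySem.Dict.mk [("product_shots", []), ("lifestyle", []), ("detail_shots", []), ("packaging", []), ("usage_scenarios", [])]) :=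
    PySem.List.foldl_congr_mem _ _ _ _ (fun d img _ => stepA_eq d img)
  rw [hfold, foldl_modify_inv]
  simp [categorize_images_py_alt, pvCategoryKeywords, pvBucket]
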